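-- pv_equiv track=rewrite | github.com/Kevin-san/ToolLesson | core/alvinreadparser/htmlreader.py | get_img_content
-- ===== SOURCE A (Python) =====
-- def get_img_content(sub_content):
--     begin_index = 0
--     content_keys = ['Content-Type','Content-Transfer-Encoding','Content-Location']
--     for sub_index,sub_line in enumerate(sub_content):
--         for content_key in content_keys:
--             if content_key in sub_line:
--                 begin_index = sub_index+1
--     return ''.join(sub_content[begin_index:])
-- ===== SOURCE B (Python) =====
-- def get_img_content(sub_content):
--     content_keys = ['Content-Type', 'Content-Transfer-Encoding', 'Content-Location']
--     begin_index = 0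
--     for i in range(len(sub_content) - 1, -1, -1):
--         if any(key in sub_content[i] for key in content_keys):
--             begin_index = i + 1
--             break
--     return ''.join(sub_content[begin_index:])
-- ===== Notes on version B (the rewrite author's own statement) =====
-- stated objective: alternative
-- what changed: B scans the lines from the end and stops at the first line containing a content header (early break), instead of A's forward scan that overwrites the index on every match.
import Mathlib
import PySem

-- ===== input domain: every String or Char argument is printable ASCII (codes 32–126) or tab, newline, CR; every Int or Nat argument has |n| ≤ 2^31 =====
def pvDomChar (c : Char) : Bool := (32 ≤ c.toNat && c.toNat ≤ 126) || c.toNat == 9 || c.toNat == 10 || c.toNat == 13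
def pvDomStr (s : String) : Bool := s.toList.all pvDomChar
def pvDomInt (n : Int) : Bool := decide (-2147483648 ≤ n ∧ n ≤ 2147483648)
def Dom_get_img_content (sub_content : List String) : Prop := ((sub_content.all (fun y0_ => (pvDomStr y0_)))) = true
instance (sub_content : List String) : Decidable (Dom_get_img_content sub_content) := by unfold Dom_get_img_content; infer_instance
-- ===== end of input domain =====

-- B scans the lines from the end and stops at the first header line (early break),
-- instead of A's forward scan that overwrites the index on every match. Same result, alternative decomposition.

-- ===== PORT A =====
-- forward scan: for each (index, line), for each key, overwrite begin_index on substring match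
def get_img_content (sub_content : List String) : String :=
  let content_keys : List String := ["Content-Type", "Content-Transfer-Encoding", "Content-Location"]
  let begin_index : Int :=
    (PySem.List.enumerate sub_content 0).foldl
      (fun acc p =>
        content_keys.foldl (fun acc2 k => if PySem.Str.isIn k p.2 then p.1 + 1 else acc2) acc)
      0
  PySem.Str.join "" (PySem.List.slice sub_content (some begin_index) none)

-- ===== PORT B =====
-- backward scan with break: first (index, line) from the rear whose line contains any key gives i+1; else 0
def pvFindBack (rev : List (Int × String)) : Int :=
  match rev with
  | [] => 0
  | p :: rest =>
      if (["Content-Type", "Content-Transfer-Encoding", "Content-Location"] : List String).any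
           (fun k => PySem.Str.isIn k p.2)
      then p.1 + 1
      else pvFindBack rest

def get_img_content_alt (sub_content : List String) : String :=
  let begin_index : Int := pvFindBack (PySem.List.enumerate sub_content 0).reverse
  PySem.Str.join "" (PySem.List.slice sub_content (some begin_index) none)

-- ===== PRECONDITION & SPEC =====
def Spec_get_img_content (sub_content : List String) (out : String) : Prop := out = get_img_content_alt sub_content
instance (sub_content : List String) (out : String) : Decidable (Spec_get_img_content sub_content out) := by unfold Spec_get_img_content; infer_instance

-- ===== CLAIM (what is proved, stated in full; the proofs are below) =====
def Claim_equal_get_img_content : Prop := ∀ (sub_content : List String), Dom_get_img_content sub_content → Spec_get_img_content sub_content (get_img_content sub_content)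

-- ===== LEMMAS AND PROOFS =====

-- folding "overwrite with v on each match" over a list of keys is "v if any key matches"
theorem pv_foldl_if_any {α : Type} (ks : List α) (f : α → Bool) (v : Int) (a0 : Int) :
    ks.foldl (fun a k => if f k then v else a) a0 = if ks.any f then v else a0 := by
  induction ks generalizing a0 with
  | nil => simp
  | cons k ks ih =>
      simp only [List.foldl_cons, List.any_cons, ih]
      by_cases h : f k <;> simp [h]

-- the forward overwrite-fold equals the backward first-match scan
theorem pv_foldl_eq_findBack (l : List (Int × String)) :
    l.foldl (fun acc p =>
        if (["Content-Type", "Content-Transfer-Encoding", "Content-Location"] : List String).any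
             (fun k => PySem.Str.isIn k p.2)
        then p.1 + 1 else acc) 0
      = pvFindBack l.reverse := by
  induction l using List.reverseRecOn with
  | nil => simp [pvFindBack]
  | append_singleton l p ih =>
      rw [List.foldl_append, List.reverse_append]
      simp only [List.foldl_cons, List.foldl_nil, List.reverse_singleton, List.singleton_append]
      simp only [pvFindBack, ih]

-- ===== VERDICT (by name: the statement is the Claim_ definition above) =====
theorem get_img_content_spec : Claim_equal_get_img_content := by
  intro sub_content _
  unfold Spec_get_img_content get_img_content get_img_content_alt
  have hfun : (fun (acc : Int) (p : Int × String) =>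
      (["Content-Type", "Content-Transfer-Encoding", "Content-Location"] : List String).foldl
        (fun acc2 k => if PySem.Str.isIn k p.2 then p.1 + 1 else acc2) acc)
    = (fun acc p =>
      if (["Content-Type", "Content-Transfer-Encoding", "Content-Location"] : List String).any
           (fun k => PySem.Str.isIn k p.2) then p.1 + 1 else acc) := by
    funext acc p; rw [pv_foldl_if_any]
  simp only [hfun, pv_foldl_eq_findBack]
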